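-- pv_equiv track=rewrite | github.com/overcast-software/career_caddy_ai | mcp_servers/chat_server.py | _render_onboarding
-- ===== SOURCE A (Python) =====
-- _ONBOARDING_LABELS = {
--     "profile_basics": "Fill in name + email",
--     "resume_imported": "Import a resume",
--     "resume_reviewed": "Review extracted resume fields",
--     "first_job_post": "Add a job post to target",
--     "first_score": "Score your resume against a job",
--     "first_cover_letter": "Generate a cover letter",
-- }
--
-- def _render_onboarding(onboarding: dict) -> tuple[str, str]:
--     """Return (onboarding_lines, next_step_label) for prompt injection."""
--     wizard_enabled = bool(onboarding.get("wizard_enabled", True))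
--     lines = [f"- wizard_enabled: {'yes' if wizard_enabled else 'no'}"]
--     next_step = "none — all setup complete"
--     for key, label in _ONBOARDING_LABELS.items():
--         done = bool(onboarding.get(key, False))
--         lines.append(f"- {key}: {'yes' if done else 'no'} ({label})")
--         if not done and next_step == "none — all setup complete":
--             next_step = label
--     if not wizard_enabled:
--         next_step = "wizard is disabled — do not volunteer onboarding advice"
--     return "\n".join(lines), next_step
-- ===== SOURCE B (Python) =====
-- _ONBOARDING_LABELS = {
--     "profile_basics": "Fill in name + email",
--     "resume_imported": "Import a resume",
--     "resume_reviewed": "Review extracted resume fields",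
--     "first_job_post": "Add a job post to target",
--     "first_score": "Score your resume against a job",
--     "first_cover_letter": "Generate a cover letter",
-- }
--
-- def _render_onboarding(onboarding: dict) -> tuple[str, str]:
--     """Return (onboarding_lines, next_step_label) for prompt injection."""
--     def walk(items):
--         # Recursion on the label list, building back-to-front:
--         # returns (lines for this suffix, first incomplete label in it).
--         if not items:
--             return [], "none — all setup complete"
--         (key, label) = items[0]
--         tail_lines, tail_next = walk(items[1:])
--         done = bool(onboarding.get(key, False))
--         line = f"- {key}: {'yes' if done else 'no'} ({label})"
--         return [line] + tail_lines, (tail_next if done else label)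
--
--     wizard_enabled = bool(onboarding.get("wizard_enabled", True))
--     step_lines, next_step = walk(list(_ONBOARDING_LABELS.items()))
--     if not wizard_enabled:
--         next_step = "wizard is disabled — do not volunteer onboarding advice"
--     lines = [f"- wizard_enabled: {'yes' if wizard_enabled else 'no'}"] + step_lines
--     return "\n".join(lines), next_step
-- ===== Notes on version B (the rewrite author's own statement) =====
-- stated objective: alternative
-- what changed: A's forward loop that appends lines while tracking the first incomplete step with a sentinel-string comparison is replaced by a structural recursion over the label list that builds the lines and the next step back-to-front: each step's next_step is its own label when incomplete, else the recursively computed next step of its suffix.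
import Mathlib
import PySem

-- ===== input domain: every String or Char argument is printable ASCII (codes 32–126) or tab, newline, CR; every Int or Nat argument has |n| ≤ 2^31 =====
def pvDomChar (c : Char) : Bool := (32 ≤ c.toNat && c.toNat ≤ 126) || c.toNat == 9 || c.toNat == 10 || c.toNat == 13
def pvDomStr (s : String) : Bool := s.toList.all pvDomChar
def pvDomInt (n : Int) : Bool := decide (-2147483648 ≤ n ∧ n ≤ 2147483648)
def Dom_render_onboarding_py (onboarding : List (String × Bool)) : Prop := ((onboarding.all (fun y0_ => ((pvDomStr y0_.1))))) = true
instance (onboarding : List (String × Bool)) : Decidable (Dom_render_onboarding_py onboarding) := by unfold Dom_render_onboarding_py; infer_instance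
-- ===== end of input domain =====

-- B replaces A's forward loop with sentinel-string tracking by a structural recursion over the
-- label list, building lines and next step back-to-front; objective: alternative decomposition.

-- onboarding.get(key, dflt): first-match lookup in the association list (Python dict has unique keys)
def pyGetD (onboarding : List (String × Bool)) (key : String) (dflt : Bool) : Bool :=
  match onboarding.find? (fun kv => kv.1 == key) with
  | some kv => kv.2
  | none => dflt

def onboardingLabels : List (String × String) :=
  [("profile_basics", "Fill in name + email"),
   ("resume_imported", "Import a resume"),
   ("resume_reviewed", "Review extracted resume fields"),
   ("first_job_post", "Add a job post to target"),
   ("first_score", "Score your resume against a job"),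
   ("first_cover_letter", "Generate a cover letter")]

-- ===== PORT A =====
def render_onboarding_py (onboarding : List (String × Bool)) : String × String :=
  let wizard_enabled := pyGetD onboarding "wizard_enabled" true
  let lines0 := ["- wizard_enabled: " ++ (if wizard_enabled then "yes" else "no")]
  let next0 := "none — all setup complete"
  let st := onboardingLabels.foldl
    (fun (st : List String × String) kl =>
      let done := pyGetD onboarding kl.1 false
      let lines := st.1 ++ ["- " ++ kl.1 ++ ": " ++ (if done then "yes" else "no") ++ " (" ++ kl.2 ++ ")"]
      let next_step := if !done && st.2 == "none — all setup complete" then kl.2 else st.2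
      (lines, next_step))
    (lines0, next0)
  let next_step := if !wizard_enabled then "wizard is disabled — do not volunteer onboarding advice" else st.2
  (PySem.Str.join "\n" st.1, next_step)

-- ===== PORT B =====
-- walk: structural recursion on the label list, back-to-front, as in Source B
def walkOnboarding (onboarding : List (String × Bool)) : List (String × String) → List String × String
  | [] => ([], "none — all setup complete")
  | kl :: rest =>
      let t := walkOnboarding onboarding rest
      let done := pyGetD onboarding kl.1 false
      let line := "- " ++ kl.1 ++ ": " ++ (if done then "yes" else "no") ++ " (" ++ kl.2 ++ ")"
      (line :: t.1, if done then t.2 else kl.2)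

def render_onboarding_py_alt (onboarding : List (String × Bool)) : String × String :=
  let wizard_enabled := pyGetD onboarding "wizard_enabled" true
  let w := walkOnboarding onboarding onboardingLabels
  let next_step := if !wizard_enabled then "wizard is disabled — do not volunteer onboarding advice" else w.2
  let lines := ("- wizard_enabled: " ++ (if wizard_enabled then "yes" else "no")) :: w.1
  (PySem.Str.join "\n" lines, next_step)

-- ===== PRECONDITION & SPEC =====
def Spec_render_onboarding_py (onboarding : List (String × Bool)) (out : String × String) : Prop := out = render_onboarding_py_alt onboarding
instance (onboarding : List (String × Bool)) (out : String × String) : Decidable (Spec_render_onboarding_py onboarding out) := by unfold Spec_render_onboarding_py; infer_instance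

-- ===== CLAIM (what is proved, stated in full; the proofs are below) =====
def Claim_equal_render_onboarding_py : Prop := ∀ (onboarding : List (String × Bool)), Dom_render_onboarding_py onboarding → Spec_render_onboarding_py onboarding (render_onboarding_py onboarding)

-- ===== LEMMAS AND PROOFS =====
theorem render_onboarding_eq (onboarding : List (String × Bool)) :
    render_onboarding_py onboarding = render_onboarding_py_alt onboarding := by
  unfold render_onboarding_py render_onboarding_py_alt onboardingLabels
  simp only [List.foldl, walkOnboarding]
  by_cases h1 : pyGetD onboarding "profile_basics" false <;>
  by_cases h2 : pyGetD onboarding "resume_imported" false <;>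
  by_cases h3 : pyGetD onboarding "resume_reviewed" false <;>
  by_cases h4 : pyGetD onboarding "first_job_post" false <;>
  by_cases h5 : pyGetD onboarding "first_score" false <;>
  by_cases h6 : pyGetD onboarding "first_cover_letter" false <;>
  simp [h1, h2, h3, h4, h5, h6]

-- ===== VERDICT (by name: the statement is the Claim_ definition above) =====
theorem render_onboarding_py_spec : Claim_equal_render_onboarding_py := by
  intro onboarding _
  unfold Spec_render_onboarding_py
  exact render_onboarding_eq onboarding
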